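-- pv_equiv track=rewrite | github.com/Dobbymin/Algo | 프로그래머스/0/181887. 홀수 vs 짝수/홀수 vs 짝수.py | solution
-- ===== SOURCE A (Python) =====
-- def solution(num_list):
--     answer = 0
--     sum_odd = 0
--     sum_even = 0
--
--     for i in range(0, len(num_list)):
--         if i % 2 == 0:
--             sum_even += num_list[i]
--         else:
--             sum_odd += num_list[i]
--
--     if sum_even > sum_odd:
--         answer = sum_even
--     else:
--         answer = sum_odd
--     return answer
-- ===== SOURCE B (Python) =====
-- def solution(num_list):
--     total = sum(num_list)
--     alt = 0
--     sign = 1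
--     for x in num_list:
--         alt += sign * x
--         sign = -sign
--     # even_sum = (total + alt) / 2, odd_sum = (total - alt) / 2,
--     # so max(even_sum, odd_sum) = (total + abs(alt)) // 2 (exact: total and alt have equal parity)
--     return (total + abs(alt)) // 2
-- ===== Notes on version B (the rewrite author's own statement) =====
-- stated objective: alternative
-- what changed: Instead of splitting elements by index parity and comparing the two sums, B computes the plain total and the alternating (signed) sum and returns the maximum via the closed form (total + |alternating|) // 2, with no parity test and no comparison.
import Mathlib
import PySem

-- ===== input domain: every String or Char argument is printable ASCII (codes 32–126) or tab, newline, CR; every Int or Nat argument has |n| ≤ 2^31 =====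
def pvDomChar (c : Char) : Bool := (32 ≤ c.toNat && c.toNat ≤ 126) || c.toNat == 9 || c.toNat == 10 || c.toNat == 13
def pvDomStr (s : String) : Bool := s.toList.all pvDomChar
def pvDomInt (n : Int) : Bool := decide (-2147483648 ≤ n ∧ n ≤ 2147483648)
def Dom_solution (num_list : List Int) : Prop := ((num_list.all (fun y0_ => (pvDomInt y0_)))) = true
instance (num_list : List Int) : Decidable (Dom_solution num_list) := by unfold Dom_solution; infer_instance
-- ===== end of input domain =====

-- B drops A's index-parity split and comparison: it computes the total and the alternating sum
-- and returns max(even,odd) via the closed form (total + |alt|) // 2; return value only, same result.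

-- ===== PORT A =====
-- state = (sum_odd, sum_even), in A's declaration order; `i % 2` on Int agrees with Python for the positive divisor 2
def solution (num_list : List Int) : Int :=
  let s :=
    (PySem.List.pyRange 0 (PySem.List.len num_list) 1).foldl
      (fun (s : Int × Int) i =>
        if i % 2 = 0 then (s.1, s.2 + PySem.List.pyGetD num_list i 0)
        else (s.1 + PySem.List.pyGetD num_list i 0, s.2))
      (0, 0)
  if s.2 > s.1 then s.2 else s.1

-- ===== PORT B =====
-- total = sum(num_list); then the for-loop over elements carrying (alt, sign); finally (total + |alt|) // 2
def solution_alt (num_list : List Int) : Int :=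
  let total := num_list.foldl (· + ·) 0
  let p := num_list.foldl (fun (p : Int × Int) x => (p.1 + p.2 * x, -p.2)) (0, 1)
  PySem.Int.floordiv (total + |p.1|) 2

-- ===== PRECONDITION & SPEC =====
def Spec_solution (num_list : List Int) (out : Int) : Prop := out = solution_alt num_list
instance (num_list : List Int) (out : Int) : Decidable (Spec_solution num_list out) := by unfold Spec_solution; infer_instance

-- ===== CLAIM =====
def Claim_equal_solution : Prop := ∀ (num_list : List Int), Dom_solution num_list → Spec_solution num_list (solution num_list)

-- ===== LEMMAS AND PROOFS =====

-- proof-side helper: A's loop with the current index made explicit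
def idxLoop : Int → List Int → Int × Int → Int × Int
  | _, [], s => s
  | i, x :: t, s => idxLoop (i + 1) t (if i % 2 = 0 then (s.1, s.2 + x) else (s.1 + x, s.2))

-- proof-side spec: (even-position sum, odd-position sum) by swap recursion
def sw : List Int → Int × Int
  | [] => (0, 0)
  | x :: t => ((sw t).2 + x, (sw t).1)

theorem foldA_eq_idxLoop (xs : List Int) :
    ∀ (t : List Int) (a : Nat) (s : Int × Int), xs.drop a = t →
    (PySem.List.pyRange (a : Int) (PySem.List.len xs) 1).foldl
      (fun (s : Int × Int) i =>
        if i % 2 = 0 then (s.1, s.2 + PySem.List.pyGetD xs i 0)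
        else (s.1 + PySem.List.pyGetD xs i 0, s.2)) s
    = idxLoop (a : Int) t s := by
  intro t
  induction t with
  | nil =>
    intro a s h
    have hlen : xs.length ≤ a := by
      by_contra hc
      have := List.drop_eq_nil_iff.mp h
      omega
    rw [PySem.List.pyRange_one_eq_nil (by simp [PySem.List.len]; exact_mod_cast hlen)]
    simp [idxLoop]
  | cons x t ih =>
    intro a s h
    have ha : a < xs.length := by
      by_contra hc
      have : xs.drop a = [] := List.drop_eq_nil_iff.mpr (by omega)
      simp [this] at h
    have hd := List.drop_eq_getElem_cons (l := xs) ha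
    rw [h] at hd
    have h0 : x = xs[a] := (List.cons.injEq _ _ _ _ ▸ hd).1
    have h' : xs.drop (a + 1) = t := ((List.cons.injEq _ _ _ _ ▸ hd).2).symm
    have hget : PySem.List.pyGetD xs (a : Int) 0 = x := by
      rw [PySem.List.pyGetD_natCast, List.getD_eq_getElem?_getD]
      simp [ha, h0]
    rw [PySem.List.pyRange_one_cons (by simp [PySem.List.len]; exact_mod_cast ha)]
    simp only [List.foldl_cons, hget]
    have hih := ih (a + 1) (if (a : Int) % 2 = 0 then (s.1, s.2 + x) else (s.1 + x, s.2)) h'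
    push_cast at hih ⊢
    rw [idxLoop, hih]

theorem idxLoop_sw (t : List Int) :
    ∀ (i e o : Int),
    idxLoop i t (o, e)
      = if i % 2 = 0 then (o + (sw t).2, e + (sw t).1) else (o + (sw t).1, e + (sw t).2) := by
  induction t with
  | nil => intro i e o; simp [idxLoop, sw]
  | cons x t ih =>
    intro i e o
    by_cases hi : i % 2 = 0
    · have h1 : ¬ ((i + 1) % 2 = 0) := by omega
      simp only [idxLoop, hi, if_pos, ih, h1, if_neg, not_false_iff, sw]
      exact congrArg₂ Prod.mk (by ring) (by ring)
    · have h1 : (i + 1) % 2 = 0 := by omega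
      simp only [idxLoop, hi, if_neg, not_false_iff, ih, h1, if_pos, sw]
      exact congrArg₂ Prod.mk (by ring) (by ring)

theorem foldl_sum_sw (xs : List Int) :
    ∀ a : Int, xs.foldl (· + ·) a = a + (sw xs).1 + (sw xs).2 := by
  induction xs with
  | nil => intro a; simp [sw]
  | cons x t ih => intro a; simp only [List.foldl_cons, ih, sw]; ring

theorem foldl_alt_sw (xs : List Int) :
    ∀ (a s : Int),
    (xs.foldl (fun (p : Int × Int) x => (p.1 + p.2 * x, -p.2)) (a, s)).1
      = a + s * ((sw xs).1 - (sw xs).2) := by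
  induction xs with
  | nil => intro a s; simp [sw]
  | cons x t ih => intro a s; simp only [List.foldl_cons, ih, sw]; ring

theorem floordiv_two_double (m : Int) : PySem.Int.floordiv (2 * m) 2 = m := by
  rw [PySem.Int.floordiv_eq_ediv_of_pos (by omega)]
  omega

theorem solution_eq (xs : List Int) : solution xs = solution_alt xs := by
  unfold solution solution_alt
  have h0 := foldA_eq_idxLoop xs xs 0 (0, 0) rfl
  simp only [Nat.cast_zero] at h0
  have h1 := idxLoop_sw xs 0 0 0
  simp only [Int.zero_emod, if_pos, zero_add] at h1
  simp only [h0, h1, foldl_sum_sw xs 0, foldl_alt_sw xs 0 1]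
  set e := (sw xs).1
  set o := (sw xs).2
  simp only [zero_add, one_mul]
  by_cases h : e > o
  · rw [if_pos (by simpa using h), abs_of_nonneg (by omega)]
    have : e + o + (e - o) = 2 * e := by ring
    rw [this, floordiv_two_double]
  · rw [if_neg (by simpa using h), abs_of_nonpos (by omega)]
    have : e + o + -(e - o) = 2 * o := by ring
    rw [this, floordiv_two_double]

-- ===== VERDICT =====
theorem solution_spec : Claim_equal_solution := by
  intro xs _
  unfold Spec_solution
  exact solution_eq xs
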